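-- pv_equiv track=rewrite | github.com/Firas-HadjKacem/FinancialBias | BiasEvaluation/core/models.py | _find_label_span
-- ===== SOURCE A (Python) =====
-- def _find_label_span(new_ids, label_seqs):
--     best = (None, None, None)  # (label, start_pos, seq_used)
--     n = len(new_ids)
--     for label, seq_list in label_seqs.items():
--         for seq in seq_list:
--             m = len(seq)
--             if m == 0 or m > n:
--                 continue
--             for i in range(0, n - m + 1):
--                 if new_ids[i:i+m] == seq:
--                     if best[1] is None or i < best[1]:
--                         best = (label, i, seq)
--                     break
--     return best
-- ===== SOURCE B (Python) =====
-- def _find_label_span(new_ids, label_seqs):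
--     # Position-major scan: walk positions left to right and return at the first
--     # position where any labelled sequence matches, so no "best" tracking is needed.
--     n = len(new_ids)
--     for i in range(n):
--         for label, seq_list in label_seqs.items():
--             for seq in seq_list:
--                 if seq and new_ids[i:i + len(seq)] == seq:
--                     return (label, i, seq)
--     return (None, None, None)
-- ===== Notes on version B (the rewrite author's own statement) =====
-- stated objective: alternative
-- what changed: B scans positions left-to-right and returns at the first position where any sequence matches, instead of A's sequence-major scan that tracks and updates a best (earliest) match across all sequences.
import Mathlib
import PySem

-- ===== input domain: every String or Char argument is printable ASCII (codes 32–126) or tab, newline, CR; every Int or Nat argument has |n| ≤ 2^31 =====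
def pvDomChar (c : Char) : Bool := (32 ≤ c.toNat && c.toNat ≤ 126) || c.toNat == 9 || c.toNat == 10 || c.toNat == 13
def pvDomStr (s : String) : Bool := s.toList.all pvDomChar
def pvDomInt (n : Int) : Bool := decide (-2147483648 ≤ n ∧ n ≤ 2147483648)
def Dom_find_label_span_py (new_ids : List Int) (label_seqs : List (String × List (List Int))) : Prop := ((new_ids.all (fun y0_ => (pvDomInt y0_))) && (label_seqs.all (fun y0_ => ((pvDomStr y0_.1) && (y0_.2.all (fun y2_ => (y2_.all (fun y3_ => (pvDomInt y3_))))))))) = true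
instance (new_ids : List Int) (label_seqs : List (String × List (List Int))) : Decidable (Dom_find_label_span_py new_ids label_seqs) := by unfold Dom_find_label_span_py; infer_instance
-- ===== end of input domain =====

-- B replaces A's sequence-major best-tracking scan by a position-major scan that
-- returns at the first matching position (objective: alternative; return value only).

-- ===== PORT A =====
-- inner `for i in range(...)` loop of A, with the `break` after the best-update
def aSeqLoop (new_ids : List Int) (label : String) (seq : List Int)
    (best : Option String × Option Int × Option (List Int)) :
    List Int → Option String × Option Int × Option (List Int)
  | [] => best
  | i :: rest =>
    if PySem.List.slice new_ids (some i) (some (i + (seq.length : Int))) = seq then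
      match best.2.1 with
      | none => (some label, some i, some seq)
      | some j => if i < j then (some label, some i, some seq) else best
    else aSeqLoop new_ids label seq best rest

def find_label_span_py (new_ids : List Int) (label_seqs : List (String × List (List Int))) :
    Option String × Option Int × Option (List Int) :=
  let n : Int := new_ids.length
  label_seqs.foldl (fun best p =>
    p.2.foldl (fun best seq =>
      let m : Int := seq.length
      if m = 0 ∨ n < m then best
      else aSeqLoop new_ids p.1 seq best (PySem.List.pyRange 0 (n - m + 1) 1)) best)
    (none, none, none)

-- ===== PORT B =====
-- innermost `for seq in seq_list` loop of B (returns at the first match)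
def bFindSeq (new_ids : List Int) (i : Int) (label : String) :
    List (List Int) → Option (String × List Int)
  | [] => none
  | s :: rest =>
    if s ≠ [] ∧ PySem.List.slice new_ids (some i) (some (i + (s.length : Int))) = s then
      some (label, s)
    else bFindSeq new_ids i label rest

-- `for label, seq_list in label_seqs.items()` loop of B at one position
def bFindAt (new_ids : List Int) (i : Int) :
    List (String × List (List Int)) → Option (String × List Int)
  | [] => none
  | p :: rest =>
    match bFindSeq new_ids i p.1 p.2 with
    | some r => some r
    | none => bFindAt new_ids i rest

-- outer `for i in range(n)` loop of B
def bPosLoop (new_ids : List Int) (label_seqs : List (String × List (List Int))) :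
    List Int → Option String × Option Int × Option (List Int)
  | [] => (none, none, none)
  | i :: rest =>
    match bFindAt new_ids i label_seqs with
    | some r => (some r.1, some i, some r.2)
    | none => bPosLoop new_ids label_seqs rest

def find_label_span_py_alt (new_ids : List Int) (label_seqs : List (String × List (List Int))) :
    Option String × Option Int × Option (List Int) :=
  bPosLoop new_ids label_seqs (PySem.List.pyRange 0 (new_ids.length : Int) 1)

-- ===== PRECONDITION & SPEC =====
def Spec_find_label_span_py (new_ids : List Int) (label_seqs : List (String × List (List Int))) (out : Option String × Option Int × Option (List Int)) : Prop := out = find_label_span_py_alt new_ids label_seqs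
instance (new_ids : List Int) (label_seqs : List (String × List (List Int))) (out : Option String × Option Int × Option (List Int)) : Decidable (Spec_find_label_span_py new_ids label_seqs out) := by unfold Spec_find_label_span_py; infer_instance

-- ===== CLAIM (what is proved, stated in full; the proofs are below) =====
def Claim_equal_find_label_span_py : Prop := ∀ (new_ids : List Int) (label_seqs : List (String × List (List Int))), Dom_find_label_span_py new_ids label_seqs → Spec_find_label_span_py new_ids label_seqs (find_label_span_py new_ids label_seqs)

-- ===== LEMMAS AND PROOFS =====

-- result type shorthand used by the proofs
def pvRes : Type := Option String × Option Int × Option (List Int)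

def pvInit : pvRes := (none, none, none)

-- A's best-update step, as a function
def pvUpd (best : pvRes) (l : String) (i : Int) (s : List Int) : pvRes :=
  match best.2.1 with
  | none => (some l, some i, some s)
  | some j => if i < j then (some l, some i, some s) else best

-- fold A's nested pair loops over the flattened (label, seq) list
def pvPairs (label_seqs : List (String × List (List Int))) : List (String × List Int) :=
  label_seqs.flatMap (fun p => p.2.map (fun s => (p.1, s)))

def pvAPair (new_ids : List Int) (best : pvRes) (p : String × List Int) : pvRes :=
  let n : Int := new_ids.length
  let m : Int := p.2.length
  if m = 0 ∨ n < m then best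
  else aSeqLoop new_ids p.1 p.2 best (PySem.List.pyRange 0 (n - m + 1) 1)

-- B's match test at one position for one pair
def pvM (new_ids : List Int) (i : Int) (p : String × List Int) : Bool :=
  decide (p.2 ≠ []) && decide (PySem.List.slice new_ids (some i) (some (i + (p.2.length : Int))) = p.2)

-- first pair of a flat pair list matching at position i
def pvScanPairs (new_ids : List Int) (i : Int) : List (String × List Int) → Option (String × List Int)
  | [] => none
  | p :: rest => if pvM new_ids i p then some p else pvScanPairs new_ids i rest

-- B, over a flat pair list
def pvBScan (new_ids : List Int) (P : List (String × List Int)) : List Int → pvRes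
  | [] => pvInit
  | i :: rest =>
    match pvScanPairs new_ids i P with
    | some r => (some r.1, some i, some r.2)
    | none => pvBScan new_ids P rest

-- first position in `is` at which pair p matches
def pvCand (new_ids : List Int) (p : String × List Int) : List Int → Option Int
  | [] => none
  | i :: rest => if pvM new_ids i p then some i else pvCand new_ids p rest

def pvCandR (new_ids : List Int) (is : List Int) (p : String × List Int) : pvRes :=
  match pvCand new_ids p is with
  | some i => (some p.1, some i, some p.2)
  | none => pvInit

-- merging two results: second wins iff strictly earlier
def pvMerge (a b : pvRes) : pvRes :=
  match b with
  | (some l, some i, some s) => pvUpd a l i s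
  | _ => a

def pvGood (r : pvRes) : Prop :=
  r = pvInit ∨ ∃ l i s, r = (some l, some i, some s)


-- pvOcc: first position in `is` where the slice equals seq (A's inner-loop search)
def pvOcc (new_ids seq : List Int) : List Int → Option Int
  | [] => none
  | i :: rest =>
    if PySem.List.slice new_ids (some i) (some (i + (seq.length : Int))) = seq then some i
    else pvOcc new_ids seq rest

theorem aSeqLoop_eq (new_ids : List Int) (l : String) (s : List Int) (best : pvRes) :
    ∀ is : List Int, aSeqLoop new_ids l s best is =
      match pvOcc new_ids s is with
      | some i => pvUpd best l i s
      | none => best := by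
  intro is
  induction is with
  | nil => rfl
  | cons i rest ih =>
    by_cases h : PySem.List.slice new_ids (some i) (some (i + (s.length : Int))) = s
    · cases hb : best.2.1 <;> (simp [aSeqLoop, pvOcc, h, pvUpd, hb]; try rfl)
    · simp [aSeqLoop, pvOcc, h, ih]

theorem pvM_false_of_late (new_ids : List Int) (i : Int) (p : String × List Int)
    (hi : 0 ≤ i) (h : (new_ids.length : Int) < i + (p.2.length : Int)) :
    ¬ pvM new_ids i p = true := by
  intro hM
  simp only [pvM, Bool.and_eq_true, decide_eq_true_eq] at hM
  obtain ⟨hne, hslice⟩ := hM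
  have hlen := congrArg List.length hslice
  rw [PySem.List.slice_toNat new_ids hi (by positivity)] at hlen
  have hl : 0 < p.2.length := List.length_pos_of_ne_nil hne
  have ht : (i + (p.2.length : Int)).toNat = i.toNat + p.2.length := by omega
  simp only [List.length_take, List.length_drop, ht] at hlen
  omega

theorem pvCand_append (new_ids : List Int) (p : String × List Int) (is1 is2 : List Int) :
    pvCand new_ids p (is1 ++ is2) = (pvCand new_ids p is1).or (pvCand new_ids p is2) := by
  induction is1 with
  | nil => rfl
  | cons i rest ih =>
    by_cases h : pvM new_ids i p
    · simp [pvCand, h]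
    · simp [pvCand, h, ih]

theorem pvCand_none (new_ids : List Int) (p : String × List Int) (is : List Int)
    (h : ∀ i ∈ is, ¬ pvM new_ids i p = true) : pvCand new_ids p is = none := by
  induction is with
  | nil => rfl
  | cons i rest ih =>
    simp [pvCand, h i (by simp)]
    exact ih (fun j hj => h j (by simp [hj]))

theorem pvCand_eq_pvOcc (new_ids : List Int) (p : String × List Int) (hne : p.2 ≠ [])
    (is : List Int) : pvCand new_ids p is = pvOcc new_ids p.2 is := by
  induction is with
  | nil => rfl
  | cons i rest ih =>
    by_cases h : PySem.List.slice new_ids (some i) (some (i + (p.2.length : Int))) = p.2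
    · simp [pvCand, pvOcc, pvM, h, hne]
    · simp [pvCand, pvOcc, pvM, h, ih]

-- A's per-pair step computes the merge of `best` with the pair's earliest match over range(n)
theorem pvAPair_eq (new_ids : List Int) (best : pvRes) (p : String × List Int) :
    pvAPair new_ids best p =
      pvMerge best (pvCandR new_ids (PySem.List.pyRange 0 (new_ids.length : Int) 1) p) := by
  set n : Int := (new_ids.length : Int) with hn
  set m : Int := (p.2.length : Int) with hm
  have hn0 : 0 ≤ n := by positivity
  by_cases hguard : m = 0 ∨ n < m
  · -- A skips the pair; no position can match
    have hcand : pvCand new_ids p (PySem.List.pyRange 0 n 1) = none := by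
      apply pvCand_none
      intro i hi
      rcases hguard with h0 | hbig
      · intro hM
        simp only [pvM, Bool.and_eq_true, decide_eq_true_eq] at hM
        exact hM.1 (List.length_eq_zero_iff.mp (by omega))
      · have := (PySem.List.mem_pyRange_one.mp hi)
        exact pvM_false_of_late new_ids i p this.1 (by omega)
    simp [pvAPair, hguard, pvCandR, ← hn, ← hm, hcand, pvMerge, pvInit]
  · rw [not_or, not_lt] at hguard
    obtain ⟨hm0, hmn⟩ := hguard
    have hm1 : 0 < m := by have : 0 ≤ m := by positivity
                           omega
    have hne : p.2 ≠ [] := by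
      intro h
      apply hm0
      simp [hm, h]
    have hsplit : PySem.List.pyRange 0 n 1 =
        PySem.List.pyRange 0 (n - m + 1) 1 ++ PySem.List.pyRange (n - m + 1) n 1 :=
      PySem.List.pyRange_one_append 0 (n - m + 1) n (by omega) (by omega)
    have htail : pvCand new_ids p (PySem.List.pyRange (n - m + 1) n 1) = none := by
      apply pvCand_none
      intro i hi
      have := PySem.List.mem_pyRange_one.mp hi
      exact pvM_false_of_late new_ids i p (by omega) (by omega)
    have hcand : pvCand new_ids p (PySem.List.pyRange 0 n 1) =
        pvOcc new_ids p.2 (PySem.List.pyRange 0 (n - m + 1) 1) := by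
      rw [hsplit, pvCand_append, htail, pvCand_eq_pvOcc new_ids p hne]
      cases pvOcc new_ids p.2 (PySem.List.pyRange 0 (n - m + 1) 1) <;> rfl
    have hnot : ¬ (m = 0 ∨ n < m) := by omega
    rw [pvAPair]
    simp only [← hn, ← hm, if_neg hnot]
    rw [aSeqLoop_eq, pvCandR, hcand]
    cases pvOcc new_ids p.2 (PySem.List.pyRange 0 (n - m + 1) 1) <;> simp [pvMerge, pvUpd, pvInit]

-- merge algebra
theorem pvMerge_init_right (a : pvRes) : pvMerge a pvInit = a := rfl

theorem pvMerge_init_left (b : pvRes) (hb : pvGood b) : pvMerge pvInit b = b := by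
  rcases hb with h | ⟨l, i, s, h⟩ <;> subst h <;> rfl

theorem pvGood_init : pvGood pvInit := Or.inl rfl

theorem pvGood_merge (a b : pvRes) (ha : pvGood a) (hb : pvGood b) : pvGood (pvMerge a b) := by
  rcases hb with h | ⟨l, i, s, h⟩ <;> subst h
  · exact ha
  · rcases ha with h | ⟨l', i', s', h⟩ <;> subst h
    · exact Or.inr ⟨l, i, s, rfl⟩
    · by_cases h : i < i' <;> simp [pvMerge, pvUpd, h]
      · exact Or.inr ⟨l, i, s, rfl⟩
      · exact Or.inr ⟨l', i', s', rfl⟩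

theorem pvGood_candR (new_ids : List Int) (is : List Int) (p : String × List Int) :
    pvGood (pvCandR new_ids is p) := by
  unfold pvCandR
  cases pvCand new_ids p is
  · exact pvGood_init
  · exact Or.inr ⟨_, _, _, rfl⟩

theorem pvMerge_assoc (a b c : pvRes) (ha : pvGood a) (hb : pvGood b) (hc : pvGood c) :
    pvMerge (pvMerge a b) c = pvMerge a (pvMerge b c) := by
  rcases hc with h | ⟨lc, ic, sc, h⟩ <;> subst h
  · rfl
  · rcases hb with h | ⟨lb, ib, sb, h⟩ <;> subst h
    · rw [pvMerge_init_right, pvMerge_init_left _ (Or.inr ⟨lc, ic, sc, rfl⟩)]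
    · rcases ha with h | ⟨la, ia, sa, h⟩ <;> subst h
      · rw [pvMerge_init_left _ (Or.inr ⟨lb, ib, sb, rfl⟩),
            pvMerge_init_left _ (pvGood_merge _ _ (Or.inr ⟨lb, ib, sb, rfl⟩)
              (Or.inr ⟨lc, ic, sc, rfl⟩))]
      · by_cases h1 : ib < ia <;> by_cases h2 : ic < ib <;> by_cases h3 : ic < ia <;>
          simp [pvMerge, pvUpd, h1, h2, h3] <;> first | rfl | (exfalso; omega)

theorem pvCand_mem (new_ids : List Int) (p : String × List Int) (j : Int) :
    ∀ is : List Int, pvCand new_ids p is = some j → j ∈ is := by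
  intro is
  induction is with
  | nil => intro h; simp [pvCand] at h
  | cons i rest ih =>
    intro h
    by_cases hM : pvM new_ids i p = true
    · simp [pvCand, hM] at h
      simp [h]
    · simp [pvCand, hM] at h
      simp [ih h]

-- shapes of pvBScan
theorem pvBScan_nil (new_ids : List Int) (is : List Int) :
    pvBScan new_ids [] is = pvInit := by
  induction is with
  | nil => rfl
  | cons i rest ih => simp [pvBScan, pvScanPairs, ih]

theorem pvBScan_shape (new_ids : List Int) (P : List (String × List Int)) (is : List Int) :
    pvBScan new_ids P is = pvInit ∨
      ∃ l i s, pvBScan new_ids P is = (some l, some i, some s) ∧ i ∈ is := by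
  induction is with
  | nil => exact Or.inl rfl
  | cons i rest ih =>
    rw [pvBScan]
    cases h : pvScanPairs new_ids i P with
    | some r => exact Or.inr ⟨r.1, i, r.2, rfl, by simp⟩
    | none =>
      rcases ih with h' | ⟨l, j, s, h', hj⟩
      · exact Or.inl h'
      · exact Or.inr ⟨l, j, s, h', by simp [hj]⟩

theorem pvGood_bScan (new_ids : List Int) (P : List (String × List Int)) (is : List Int) :
    pvGood (pvBScan new_ids P is) := by
  rcases pvBScan_shape new_ids P is with h | ⟨l, i, s, h, _⟩
  · exact Or.inl h
  · exact Or.inr ⟨l, i, s, h⟩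

-- KEY: folding one more pair into the position scan (positions strictly increasing)
theorem pvMerge_candR_bScan (new_ids : List Int) (p : String × List Int)
    (P : List (String × List Int)) :
    ∀ is : List Int, is.Pairwise (· < ·) →
      pvMerge (pvCandR new_ids is p) (pvBScan new_ids P is) = pvBScan new_ids (p :: P) is := by
  intro is
  induction is with
  | nil => intro _; rfl
  | cons i rest ih =>
    intro hsort
    have hrest : rest.Pairwise (· < ·) := hsort.of_cons
    have hlt : ∀ j ∈ rest, i < j := fun j hj => (List.pairwise_cons.mp hsort).1 j hj
    by_cases hM : pvM new_ids i p = true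
    · -- p matches at the head position i: p wins on the left at i
      have hcand : pvCandR new_ids (i :: rest) p = (some p.1, some i, some p.2) := by
        simp [pvCandR, pvCand, hM]
      have hscan : pvScanPairs new_ids i (p :: P) = some p := by simp [pvScanPairs, hM]
      rw [hcand]
      conv_rhs => rw [pvBScan, hscan]
      rw [pvBScan]
      cases h : pvScanPairs new_ids i P with
      | some r => simp [pvMerge, pvUpd]
      | none =>
        rcases pvBScan_shape new_ids P rest with h' | ⟨l, j, s, h', hj⟩
        · rw [h', pvMerge_init_right]
        · rw [h']
          have : ¬ j < i := by have := hlt j hj; omega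
          simp [pvMerge, pvUpd, this]
    · -- p does not match at i
      have hcand : pvCandR new_ids (i :: rest) p = pvCandR new_ids rest p := by
        simp [pvCandR, pvCand, hM]
      have hscan : pvScanPairs new_ids i (p :: P) = pvScanPairs new_ids i P := by
        simp [pvScanPairs, hM]
      rw [hcand]
      conv_rhs => rw [pvBScan, hscan]
      rw [pvBScan]
      cases h : pvScanPairs new_ids i P with
      | none => exact ih hrest
      | some r =>
        rcases hcR : pvCand new_ids p rest with _ | j
        · simp [pvCandR, hcR, pvMerge_init_left _ (Or.inr ⟨r.1, i, r.2, rfl⟩)]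
        · have hj : j ∈ rest := pvCand_mem new_ids p j rest hcR
          simp [pvCandR, hcR, pvMerge, pvUpd, hlt j hj]

-- A's fold over the flat pair list equals merging `best` with B's position scan
theorem pvFold_eq (new_ids : List Int) :
    ∀ (P : List (String × List Int)) (best : pvRes), pvGood best →
      P.foldl (pvAPair new_ids) best =
        pvMerge best (pvBScan new_ids P (PySem.List.pyRange 0 (new_ids.length : Int) 1)) := by
  intro P
  induction P with
  | nil =>
    intro best _
    rw [List.foldl_nil, pvBScan_nil, pvMerge_init_right]
  | cons p P ih =>
    intro best hbest
    set is := PySem.List.pyRange 0 (new_ids.length : Int) 1 with his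
    have hsort : is.Pairwise (· < ·) := PySem.List.pairwise_lt_pyRange_one 0 _
    rw [List.foldl_cons, ih _ (by
      rw [pvAPair_eq]
      exact pvGood_merge _ _ hbest (pvGood_candR _ _ _)), pvAPair_eq,
      pvMerge_assoc _ _ _ hbest (pvGood_candR _ _ _) (pvGood_bScan _ _ _),
      pvMerge_candR_bScan new_ids p P is hsort]

-- B's nested loops equal the flat pair scan
theorem bFindSeq_eq (new_ids : List Int) (i : Int) (l : String) (sl : List (List Int)) :
    bFindSeq new_ids i l sl = pvScanPairs new_ids i (sl.map (fun s => (l, s))) := by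
  induction sl with
  | nil => rfl
  | cons s rest ih =>
    by_cases h : pvM new_ids i (l, s) = true
    · have h' := h
      simp only [pvM, Bool.and_eq_true, decide_eq_true_eq] at h'
      simp [bFindSeq, pvScanPairs, pvM, h'.1, h'.2]
    · have h' : ¬ (s ≠ [] ∧ PySem.List.slice new_ids (some i) (some (i + (s.length : Int))) = s) := by
        intro hc
        exact h (by simp [pvM, hc.1, hc.2])
      simp [bFindSeq, pvScanPairs, h', h, ih]

theorem bFindAt_eq (new_ids : List Int) (i : Int) (L : List (String × List (List Int))) :
    bFindAt new_ids i L = pvScanPairs new_ids i (pvPairs L) := by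
  induction L with
  | nil => rfl
  | cons p rest ih =>
    have happ : ∀ P1 P2 : List (String × List Int),
        pvScanPairs new_ids i (P1 ++ P2) =
          (pvScanPairs new_ids i P1).or (pvScanPairs new_ids i P2) := by
      intro P1 P2
      induction P1 with
      | nil => rfl
      | cons q qs ihq =>
        by_cases h : pvM new_ids i q = true
        · simp [pvScanPairs, h]
        · simp [pvScanPairs, h, ihq]
    rw [bFindAt, pvPairs, List.flatMap_cons, happ, ← pvPairs, ← bFindSeq_eq, ← ih]
    cases bFindSeq new_ids i p.1 p.2 <;> rfl

theorem bPosLoop_eq (new_ids : List Int) (L : List (String × List (List Int))) :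
    ∀ is : List Int, bPosLoop new_ids L is = pvBScan new_ids (pvPairs L) is := by
  intro is
  induction is with
  | nil => rfl
  | cons i rest ih =>
    rw [bPosLoop, pvBScan, bFindAt_eq]
    cases pvScanPairs new_ids i (pvPairs L) <;> simp [ih]

-- A as a fold over the flat pair list
theorem find_label_span_py_eq (new_ids : List Int) (label_seqs : List (String × List (List Int))) :
    find_label_span_py new_ids label_seqs =
      (pvPairs label_seqs).foldl (pvAPair new_ids) pvInit := by
  rw [find_label_span_py, pvPairs, List.foldl_flatMap]
  congr 1
  funext best p
  rw [List.foldl_map]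
  rfl

-- ===== VERDICT (by name: the statement is the Claim_ definition above) =====
theorem find_label_span_py_spec : Claim_equal_find_label_span_py := by
  intro new_ids label_seqs _
  unfold Spec_find_label_span_py
  rw [find_label_span_py_eq, pvFold_eq new_ids (pvPairs label_seqs) pvInit pvGood_init,
    pvMerge_init_left _ (pvGood_bScan _ _ _), find_label_span_py_alt, bPosLoop_eq]
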